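-- pv_equiv track=rewrite | github.com/posl/comment_recommendation | script/mod_gen/2_time/zh/102_D/2.py | get_min_max_diff
-- ===== SOURCE A (Python) =====
-- def get_min_max_diff(A):
--     N = len(A)
--     min_diff = 10 ** 9
--     for i in range(1, N - 2):
--         for j in range(i + 1, N - 1):
--             for k in range(j + 1, N):
--                 P = sum(A[:i])
--                 Q = sum(A[i:j])
--                 R = sum(A[j:k])
--                 S = sum(A[k:])
--                 diff = max(P, Q, R, S) - min(P, Q, R, S)
--                 if diff < min_diff:
--                     min_diff = diff
--     return min_diff
-- ===== SOURCE B (Python) =====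
-- def get_min_max_diff(A):
--     N = len(A)
--     total = 0
--     pref = [0]
--     for x in A:
--         total += x
--         pref.append(total)
--     cands = [max(p, q, r, s) - min(p, q, r, s)
--              for i in range(1, N - 2)
--              for j in range(i + 1, N - 1)
--              for k in range(j + 1, N)
--              for (p, q, r, s) in [(pref[i], pref[j] - pref[i],
--                                    pref[k] - pref[j], total - pref[k])]]
--     return min([10 ** 9] + cands)
-- ===== Notes on version B (the rewrite author's own statement) =====
-- stated objective: faster
-- what changed: A prefix-sum array built once replaces the four O(N) slice sums inside the innermost loop, and the nested accumulator loops become a single min over a generated candidate list.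
import Mathlib
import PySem

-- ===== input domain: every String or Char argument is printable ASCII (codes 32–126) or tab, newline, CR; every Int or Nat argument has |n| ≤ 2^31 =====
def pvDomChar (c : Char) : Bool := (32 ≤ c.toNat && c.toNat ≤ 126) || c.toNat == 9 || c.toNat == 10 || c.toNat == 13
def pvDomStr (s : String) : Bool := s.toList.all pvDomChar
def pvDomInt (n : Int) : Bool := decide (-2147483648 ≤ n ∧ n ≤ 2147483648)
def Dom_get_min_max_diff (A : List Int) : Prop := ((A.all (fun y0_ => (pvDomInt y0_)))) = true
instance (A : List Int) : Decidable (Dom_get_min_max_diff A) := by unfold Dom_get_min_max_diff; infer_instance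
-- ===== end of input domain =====

-- B replaces the four O(N) slice sums in the innermost loop by lookups in a prefix-sum
-- array built once, and the nested min-accumulator loops by one min over a candidate list.

-- ===== PORT A =====
def get_min_max_diff (A : List Int) : Int :=
  let N : Int := A.length
  (PySem.List.pyRange 1 (N - 2) 1).foldl (fun md1 i =>
    (PySem.List.pyRange (i + 1) (N - 1) 1).foldl (fun md2 j =>
      (PySem.List.pyRange (j + 1) N 1).foldl (fun md3 k =>
        let P := (PySem.List.slice A none (some i)).sum
        let Q := (PySem.List.slice A (some i) (some j)).sum
        let R := (PySem.List.slice A (some j) (some k)).sum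
        let S := (PySem.List.slice A (some k) none).sum
        let diff := max (max (max P Q) R) S - min (min (min P Q) R) S
        if diff < md3 then diff else md3) md2) md1) (10 ^ 9)

-- ===== PORT B =====
def get_min_max_diff_alt (A : List Int) : Int :=
  let N : Int := A.length
  let acc := A.foldl (fun (ts : Int × List Int) x => (ts.1 + x, ts.2 ++ [ts.1 + x])) (0, [0])
  let total := acc.1
  let pref := acc.2
  let cands := (PySem.List.pyRange 1 (N - 2) 1).flatMap (fun i =>
    (PySem.List.pyRange (i + 1) (N - 1) 1).flatMap (fun j =>
      (PySem.List.pyRange (j + 1) N 1).map (fun k =>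
        let p := PySem.List.pyGetD pref i 0
        let q := PySem.List.pyGetD pref j 0 - PySem.List.pyGetD pref i 0
        let r := PySem.List.pyGetD pref k 0 - PySem.List.pyGetD pref j 0
        let s := total - PySem.List.pyGetD pref k 0
        max (max (max p q) r) s - min (min (min p q) r) s)))
  match PySem.List.min? ((10 ^ 9 : Int) :: cands) (fun y => y) with
  | some v => v
  | none => 0

-- ===== PRECONDITION & SPEC =====
def Spec_get_min_max_diff (A : List Int) (out : Int) : Prop := out = get_min_max_diff_alt A
instance (A : List Int) (out : Int) : Decidable (Spec_get_min_max_diff A out) := by unfold Spec_get_min_max_diff; infer_instance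

-- ===== CLAIM (what is proved, stated in full; the proofs are below) =====
def Claim_equal_get_min_max_diff : Prop := ∀ (A : List Int), Dom_get_min_max_diff A → Spec_get_min_max_diff A (get_min_max_diff A)

-- ===== LEMMAS AND PROOFS =====

-- the prefix-sum fold of B, characterised
lemma pv_fold_pref (A : List Int) : ∀ (s : Int) (l : List Int),
    A.foldl (fun (ts : Int × List Int) x => (ts.1 + x, ts.2 ++ [ts.1 + x])) (s, l)
      = (s + A.sum, l ++ (List.range A.length).map (fun t => s + (A.take (t + 1)).sum)) := by
  induction A with
  | nil => simp
  | cons x A ih =>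
    intro s l
    simp only [List.foldl_cons, ih, List.sum_cons, List.length_cons,
      List.range_succ_eq_map, List.map_cons, List.map_map]
    rw [Prod.mk.injEq]
    refine ⟨by ring, ?_⟩
    simp [Function.comp_def, List.take_succ_cons, add_assoc]

lemma pv_pref_eq (A : List Int) :
    A.foldl (fun (ts : Int × List Int) x => (ts.1 + x, ts.2 ++ [ts.1 + x])) (0, [0])
      = (A.sum, (List.range (A.length + 1)).map (fun t => (A.take t).sum)) := by
  rw [pv_fold_pref]
  simp [List.range_succ_eq_map, List.map_map, Function.comp_def]

lemma pv_pref_get (A : List Int) (i : Int) (h0 : 0 ≤ i) (h1 : i ≤ (A.length : Int)) :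
    PySem.List.pyGetD ((List.range (A.length + 1)).map (fun t => (A.take t).sum)) i 0
      = (A.take i.toNat).sum := by
  rw [PySem.List.pyGetD_eq_getElem _ _ h0 (by simp; omega)]
  simp

lemma pv_take_sub (A : List Int) (a b : Nat) (hab : a ≤ b) :
    ((A.drop a).take (b - a)).sum = (A.take b).sum - (A.take a).sum := by
  have h : A.take b = A.take a ++ (A.drop a).take (b - a) := by
    rw [← List.take_add]
    congr 1
    omega
  rw [h, List.sum_append]
  ring

lemma pv_drop_sum (A : List Int) (a : Nat) :
    (A.drop a).sum = A.sum - (A.take a).sum := by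
  have := List.sum_take_add_sum_drop A a
  omega

lemma pv_if_min (a b : Int) : (if b < a then b else a) = min a b := by
  rw [min_def]
  split_ifs <;> omega

lemma pv_foldl3 (l1 : List Int) (l2 : Int → List Int) (l3 : Int → Int → List Int)
    (f : Int → Int → Int → Int) (init : Int) :
    l1.foldl (fun m1 i => (l2 i).foldl (fun m2 j => (l3 i j).foldl (fun m3 k =>
        min m3 (f i j k)) m2) m1) init
      = (l1.flatMap (fun i => (l2 i).flatMap (fun j => (l3 i j).map (f i j)))).foldl min init := by
  simp [List.foldl_flatMap, List.foldl_map]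

-- ===== VERDICT (by name: the statement is the Claim_ definition above) =====
theorem get_min_max_diff_spec : Claim_equal_get_min_max_diff := by
  intro A _
  show get_min_max_diff A = get_min_max_diff_alt A
  simp only [get_min_max_diff, get_min_max_diff_alt, pv_pref_eq, pv_if_min,
    PySem.List.min?_id_cons]
  rw [pv_foldl3]
  congr 1
  apply List.flatMap_congr
  intro i hi
  rw [PySem.List.mem_pyRange_one] at hi
  apply List.flatMap_congr
  intro j hj
  rw [PySem.List.mem_pyRange_one] at hj
  apply List.map_congr_left
  intro k hk
  rw [PySem.List.mem_pyRange_one] at hk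
  rw [PySem.List.slice_to A (b := i) (by omega), PySem.List.slice_from A (a := k) (by omega),
    PySem.List.slice_toNat A (a := i) (b := j) (by omega) (by omega),
    PySem.List.slice_toNat A (a := j) (b := k) (by omega) (by omega),
    pv_pref_get A i (by omega) (by omega), pv_pref_get A j (by omega) (by omega),
    pv_pref_get A k (by omega) (by omega),
    pv_take_sub A i.toNat j.toNat (by omega), pv_take_sub A j.toNat k.toNat (by omega),
    pv_drop_sum]
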